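-- pv_equiv track=rewrite | github.com/jano31415/codejam | codeforces/722_round_div2/probd.py | solve
-- ===== SOURCE A (Python) =====
-- def solve(N):
--     mod_val = 998244353
--     if N == 1:
--         return 1
--     dyn = [0]*(N + 1)
--     dyn[2] = 1
--     dyn[0] = 1
--     dyn2 = sieve2(N+1)
--     for n2 in range(4, N+1, 2):
--         dyn[n2] = (2*dyn[n2-2] + dyn2[n2] - dyn2[n2-2]) % mod_val
--     return dyn[N]
--
-- def sieve2(max_p):
--     div_count = [0]*(max_p+1)
--     for i in range(2, max_p,2):
--         for j in range(1, max_p//i + 1):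
--             div_count[i*j] += 1
--     return div_count
-- ===== SOURCE B (Python) =====
-- def solve(N):
--     p = 998244353
--     if N == 1:
--         return 1
--     if N % 2 == 1:
--         return 0
--     h = N // 2
--     if h == 1:
--         return 1
--     # Closed form obtained by unrolling A's linear recurrence (Abel summation):
--     #   answer = 2^(h-2) + sum_{k=2}^{h} w(k) * d(k)   (mod p),
--     # where d(k) is the divisor count of k, w(h) = 1 and w(k) = 2^(h-1-k) for k < h.
--     # The weighted divisor sum is accumulated directly by a sieve over divisors,
--     # with no DP array and no divisor-count array.
--     pw = [1] * (h - 1)          # pw[t] = 2^t mod p, 0 <= t <= h-2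
--     for t in range(1, h - 1):
--         pw[t] = pw[t - 1] * 2 % p
--     s = pw[h - 2]
--     for i in range(1, h + 1):
--         for m in range(max(i, 2), h + 1, i):
--             s = (s + (1 if m == h else pw[h - 1 - m])) % p
--     return s
-- ===== Notes on version B (the rewrite author's own statement) =====
-- stated objective: alternative
-- what changed: B replaces A's DP recurrence entirely by its closed form obtained by Abel summation (answer = 2^(h-2) + sum_{k=2}^{h} w(k)*d(k) mod p with h=N//2, w(h)=1, w(k)=2^(h-1-k)), accumulating the weighted divisor sum in a single scalar during one divisor sieve over a precomputed power table; there is no DP array and no divisor-count array, and odd N is answered 0 by a direct parity test instead of reading an untouched zero entry.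
import Mathlib
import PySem

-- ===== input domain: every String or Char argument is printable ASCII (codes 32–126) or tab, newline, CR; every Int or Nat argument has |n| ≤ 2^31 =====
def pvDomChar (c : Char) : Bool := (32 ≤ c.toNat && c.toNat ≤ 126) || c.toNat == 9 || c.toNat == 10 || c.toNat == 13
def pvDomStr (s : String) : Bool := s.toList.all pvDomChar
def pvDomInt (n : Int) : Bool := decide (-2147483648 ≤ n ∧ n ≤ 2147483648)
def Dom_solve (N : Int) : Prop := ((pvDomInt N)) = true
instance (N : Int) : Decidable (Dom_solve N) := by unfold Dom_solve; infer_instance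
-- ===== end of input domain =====

-- B replaces A's DP recurrence by its closed form (Abel summation):
-- answer = 2^(h-2) + Σ_{k=2}^{h} w(k)·d(k) mod p with h = N//2, w(h)=1, w(k)=2^(h-1-k),
-- accumulated in one scalar during a single divisor sieve (objective: alternative).

-- Python lists here are mutable arrays updated in place; they are ported as Array Int with
-- O(1) in-place updates. pyget/pyset are exact for the accesses the algorithms make: under
-- Pre_solve every index is nonnegative and in range (same totalisation convention as
-- PySem.List.pyGetD/pySetD).
def pyget (xs : Array Int) (i : Int) : Int :=
  if h : 0 ≤ i ∧ i.toNat < xs.size then xs[i.toNat]'h.2 else 0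

def pyset (xs : Array Int) (i : Int) (v : Int) : Array Int :=
  if h : 0 ≤ i ∧ i.toNat < xs.size then xs.set i.toNat v h.2 else xs

-- ===== PORT A =====
def sieve2 (max_p : Int) : Array Int :=
  let div_count : Array Int := Array.replicate (max_p + 1).toNat 0
  (PySem.List.pyRange 2 max_p 2).foldl
    (fun div_count i =>
      (PySem.List.pyRange 1 (PySem.Int.floordiv max_p i + 1) 1).foldl
        (fun div_count j =>
          pyset div_count (i * j) (pyget div_count (i * j) + 1))
        div_count)
    div_count

def solve (N : Int) : Int :=
  let mod_val : Int := 998244353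
  if N = 1 then 1
  else
    let dyn : Array Int := Array.replicate (N + 1).toNat 0
    -- dyn[2] = 1 and dyn[0] = 1: in range under Pre_solve (N ≥ 2 on this branch)
    let dyn := pyset dyn 2 1
    let dyn := pyset dyn 0 1
    let dyn2 := sieve2 (N + 1)
    let dyn := (PySem.List.pyRange 4 (N + 1) 2).foldl
      (fun dyn n2 =>
        pyset dyn n2
          (PySem.Int.mod
            (2 * pyget dyn (n2 - 2) + pyget dyn2 n2 - pyget dyn2 (n2 - 2))
            mod_val))
      dyn
    -- dyn[N]: in range under Pre_solve
    pyget dyn N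

-- ===== PORT B =====
def solve_alt (N : Int) : Int :=
  let p : Int := 998244353
  if N = 1 then 1
  else if PySem.Int.mod N 2 = 1 then 0
  else
    let h := PySem.Int.floordiv N 2
    if h = 1 then 1
    else
      let pw : Array Int := Array.replicate (h - 1).toNat 1
      let pw := (PySem.List.pyRange 1 (h - 1) 1).foldl
        (fun pw t => pyset pw t (PySem.Int.mod (pyget pw (t - 1) * 2) p)) pw
      (PySem.List.pyRange 1 (h + 1) 1).foldl
        (fun s i =>
          (PySem.List.pyRange (max i 2) (h + 1) i).foldl
            (fun s m =>
              PySem.Int.mod (s + (if m = h then 1 else pyget pw (h - 1 - m))) p)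
            s)
        (pyget pw (h - 2))

-- ===== PRECONDITION & SPEC =====
-- Pre_solve: A raises IndexError (dyn[2] = 1 on a list of length ≤ 2) for every N ≤ 0.
def Pre_solve (N : Int) : Prop := 1 ≤ N
instance (N : Int) : Decidable (Pre_solve N) := by unfold Pre_solve; infer_instance
def pvWitness_solve : Int := 6

def Spec_solve (N : Int) (out : Int) : Prop := out = solve_alt N
instance (N : Int) (out : Int) : Decidable (Spec_solve N out) := by unfold Spec_solve; infer_instance

-- ===== CLAIM (what is proved, stated in full; the proofs are below) =====
def Claim_equal_solve : Prop := ∀ (N : Int), Dom_solve N → Pre_solve N → Spec_solve N (solve N)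

-- ===== LEMMAS AND PROOFS =====

-- number of divisors i with 1 ≤ i ≤ h of k (for 1 ≤ k ≤ h this is the divisor count of k)
def pvD (h k : Int) : Nat := (PySem.List.pyRange 1 (h + 1) 1).countP (fun i => decide (i ∣ k))

-- the DP recurrence A computes: pvSpec h j = dyn[2*(j+1)]
def pvSpec (h : Int) : Nat → Int
  | 0 => 1
  | j + 1 => PySem.Int.mod
      (2 * pvSpec h j + (pvD h ((j : Int) + 2) : Int) - (pvD h ((j : Int) + 1) : Int)) 998244353

-- the exact (un-reduced) unrolled value of the recurrence
def pvT (h : Int) (j : Nat) : Int :=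
  2 ^ j + ∑ t ∈ Finset.range j,
    2 ^ (j - 1 - t) * ((pvD h ((t : Int) + 2) : Int) - (pvD h ((t : Int) + 1) : Int))

-- exact weight of d(k) in the closed form
def pvW (h m : Int) : Int := if m = h then 1 else 2 ^ (h - 1 - m).toNat

-- the flattened list of divisor/multiple visits of B's sieve
def pvL (h : Int) : List Int :=
  (PySem.List.pyRange 1 (h + 1) 1).flatMap fun i => PySem.List.pyRange (max i 2) (h + 1) i

-- the write keeps the size
theorem pvSizeSet (xs : Array Int) (i v : Int) : (pyset xs i v).size = xs.size := by
  unfold pyset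
  split <;> simp

-- reading a replicate-0 array always yields 0
theorem pvGetRep (n : Nat) (m : Int) : pyget (Array.replicate n (0 : Int)) m = 0 := by
  unfold pyget
  split <;> simp

-- an in-range write is Array.set
theorem pvSetIn (xs : Array Int) (p v : Int) (hp : 0 ≤ p) (hlen : p.toNat < xs.size) :
    pyset xs p v = xs.set p.toNat v hlen := by
  unfold pyset
  rw [dif_pos ⟨hp, hlen⟩]

-- read-after-write, Int indices
theorem pvGetSet (xs : Array Int) (p m v : Int) (hp : 0 ≤ p) (hm : 0 ≤ m)
    (hlen : p < (xs.size : Int)) :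
    pyget (pyset xs p v) m = if m = p then v else pyget xs m := by
  rw [pvSetIn xs p v hp (by omega)]
  unfold pyget
  simp only [Array.size_set]
  by_cases hmb : 0 ≤ m ∧ m.toNat < xs.size
  · rw [dif_pos hmb, dif_pos hmb]
    by_cases hmp : m = p
    · subst hmp
      rw [if_pos rfl]
      simp
    · have hne : p.toNat ≠ m.toNat := by omega
      rw [if_neg hmp]
      simp [Array.getElem_set, hne]
  · rw [dif_neg hmb, dif_neg hmb, if_neg (by omega)]

-- a write elsewhere (any nonnegative position) does not change the value read
theorem pvGetSetNe (xs : Array Int) (p m v : Int) (hp : 0 ≤ p) (hm : 0 ≤ m) (hne : m ≠ p) :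
    pyget (pyset xs p v) m = pyget xs m := by
  by_cases hpb : p.toNat < xs.size
  · rw [pvSetIn xs p v hp hpb]
    unfold pyget
    simp only [Array.size_set]
    by_cases hmb : 0 ≤ m ∧ m.toNat < xs.size
    · have hne' : p.toNat ≠ m.toNat := by omega
      rw [dif_pos hmb, dif_pos hmb]
      simp [Array.getElem_set, hne']
    · rw [dif_neg hmb, dif_neg hmb]
  · unfold pyset
    rw [dif_neg (by omega)]

-- a fold of writes preserves the size
theorem pvLen (v : Array Int → Int → Array Int) (hv : ∀ a p, (v a p).size = a.size) :
    ∀ (ps : List Int) (xs : Array Int), (ps.foldl v xs).size = xs.size := by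
  intro ps
  induction ps with
  | nil => intro xs; rfl
  | cons p ps ih => intro xs; rw [List.foldl_cons, ih, hv]

-- a fold of writes at nonnegative positions all ≠ m does not change position m
theorem pvUntouched (w : Array Int → Int → Int) :
    ∀ (ps : List Int) (xs : Array Int) (m : Int), 0 ≤ m →
      (∀ p ∈ ps, 0 ≤ p ∧ p ≠ m) →
      pyget (ps.foldl (fun a p => pyset a p (w a p)) xs) m = pyget xs m := by
  intro ps
  induction ps with
  | nil => intro xs m _ _; rfl
  | cons p ps ih =>
    intro xs m hm hps
    obtain ⟨hp0, hpm⟩ := hps p (List.mem_cons_self ..)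
    rw [List.foldl_cons, ih _ m hm (fun q hq => hps q (List.mem_cons_of_mem _ hq)),
      pvGetSetNe xs p m _ hp0 hm (fun h => hpm h.symm)]

-- the sieve increment step
def pvStep (a : Array Int) (p : Int) : Array Int :=
  pyset a p (pyget a p + 1)

-- a fold of increments adds the multiplicity of m among the positions
theorem pvIncCount :
    ∀ (ps : List Int) (xs : Array Int) (m : Int), 0 ≤ m →
      (∀ p ∈ ps, 0 ≤ p ∧ p < (xs.size : Int)) →
      pyget (ps.foldl pvStep xs) m = pyget xs m + (ps.count m : Int) := by
  intro ps
  induction ps with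
  | nil => intro xs m _ _; simp
  | cons p ps ih =>
    intro xs m hm hps
    obtain ⟨hp0, hpl⟩ := hps p (List.mem_cons_self ..)
    have hlen : ((pyset xs p (pyget xs p + 1)).size : Int) = (xs.size : Int) := by
      rw [pvSizeSet]
    rw [List.foldl_cons]
    show pyget (ps.foldl pvStep (pvStep xs p)) m = _
    rw [ih (pvStep xs p) m hm
      (fun q hq => by
        obtain ⟨h1, h2⟩ := hps q (List.mem_cons_of_mem _ hq)
        refine ⟨h1, ?_⟩
        unfold pvStep
        rw [hlen]; exact h2)]
    unfold pvStep
    rw [pvGetSet xs p m _ hp0 hm hpl, List.count_cons]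
    by_cases h : m = p
    · subst h
      rw [if_pos rfl, if_pos (by simp)]
      push_cast
      omega
    · rw [if_neg h, if_neg (by simp only [beq_iff_eq]; omega)]
      push_cast
      omega

-- a double fold is a fold over the flattened position list
theorem pvFoldFlat {σ : Type} (f : σ → Int → σ) :
    ∀ (l : List Int) (g : Int → List Int) (xs : σ),
      l.foldl (fun a i => (g i).foldl f a) xs = (l.flatMap g).foldl f xs := by
  intro l
  induction l with
  | nil => intro g xs; rfl
  | cons i l ih => intro g xs; rw [List.foldl_cons, List.flatMap_cons, List.foldl_append, ih]

-- count distributes over flatMap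
theorem pvCountFlat (m : Int) :
    ∀ (l : List Int) (g : Int → List Int),
      (l.flatMap g).count m = ((l.map fun i => (g i).count m).sum) := by
  intro l
  induction l with
  | nil => intro g; rfl
  | cons i l ih => intro g; rw [List.flatMap_cons, List.count_append, ih]; simp

-- a 0/1 sum is a countP
theorem pvSumIte (p : Int → Prop) [DecidablePred p] :
    ∀ (l : List Int),
      (l.map fun i => if p i then (1 : Nat) else 0).sum = l.countP (fun i => decide (p i)) := by
  intro l
  induction l with
  | nil => rfl
  | cons i l ih =>
    rw [List.map_cons, List.sum_cons, ih, List.countP_cons]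
    by_cases h : p i <;> simp [h, Nat.add_comm]

-- count of m among the multiples i*1, …, i*(B/i)
theorem pvCountMulRange (i m B : Int) (hi : 1 ≤ i) (hm : 1 ≤ m) (hmB : m ≤ B) :
    ((PySem.List.pyRange 1 (B / i + 1) 1).map fun j => i * j).count m =
      if i ∣ m then 1 else 0 := by
  have hinj : Function.Injective (fun j : Int => i * j) := fun a b h => by
    have : i ≠ 0 := by omega
    exact mul_left_cancel₀ this h
  have hnd : ((PySem.List.pyRange 1 (B / i + 1) 1).map fun j => i * j).Nodup :=
    (PySem.List.nodup_pyRange_one 1 (B / i + 1)).map hinj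
  by_cases hdvd : i ∣ m
  · rw [if_pos hdvd]
    have hmem : m ∈ (PySem.List.pyRange 1 (B / i + 1) 1).map fun j => i * j := by
      obtain ⟨c, rfl⟩ := hdvd
      refine List.mem_map.mpr ⟨c, ?_, rfl⟩
      rw [PySem.List.mem_pyRange_one]
      constructor
      · nlinarith
      · have h1 : c * i ≤ B := by linarith [mul_comm i c]
        have := (Int.le_ediv_iff_mul_le (by omega : (0 : Int) < i)).mpr h1
        omega
    exact List.count_eq_one_of_mem hnd hmem
  · rw [if_neg hdvd]
    refine List.count_eq_zero_of_not_mem fun hmem => hdvd ?_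
    obtain ⟨j, _, hj⟩ := List.mem_map.mp hmem
    exact ⟨j, hj.symm⟩

-- count of m among the multiples i, 2i, … ≤ h (a step-i range)
theorem pvCountStepRange (i k h : Int) (hi : 1 ≤ i) (hk : 1 ≤ k) (hkh : k ≤ h) :
    (PySem.List.pyRange i (h + 1) i).count k = if i ∣ k then 1 else 0 := by
  have hpos : (0 : Int) < i := by omega
  have hnd : (PySem.List.pyRange i (h + 1) i).Nodup := by
    rw [PySem.List.pyRange_of_pos i (h + 1) hpos]
    refine List.nodup_range.map ?_
    intro a b hab
    simp only at hab
    have : i * (a : Int) = i * (b : Int) := by omega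
    have := mul_left_cancel₀ (by omega : (i : Int) ≠ 0) this
    exact_mod_cast this
  by_cases hdvd : i ∣ k
  · rw [if_pos hdvd]
    have hmem : k ∈ PySem.List.pyRange i (h + 1) i := by
      rw [PySem.List.mem_pyRange_iff_of_pos hpos]
      exact ⟨Int.le_of_dvd (by omega) hdvd, by omega, dvd_sub hdvd dvd_rfl⟩
    exact List.count_eq_one_of_mem hnd hmem
  · rw [if_neg hdvd]
    refine List.count_eq_zero_of_not_mem fun hmem => hdvd ?_
    rw [PySem.List.mem_pyRange_iff_of_pos hpos] at hmem
    have : i ∣ (k - i) + i := dvd_add hmem.2.2 dvd_rfl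
    simpa using this

-- the even range 2,4,…,2h is the doubled range 1,…,h
theorem pvEvenRange (h : Int) (hh : 0 ≤ h) :
    PySem.List.pyRange 2 (2 * h + 1) 2 = (PySem.List.pyRange 1 (h + 1) 1).map fun d => 2 * d := by
  rw [PySem.List.pyRange_of_pos 2 (2 * h + 1) (by norm_num), PySem.List.pyRange_one 1 (h + 1),
    List.map_map]
  have hc : (if (2 : Int) < 2 * h + 1 then ((2 * h + 1 - 2 + 2 - 1) / 2).toNat else 0) = h.toNat := by
    rw [show (2 * h + 1 - 2 + 2 - 1 : Int) = 2 * h by ring,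
      Int.mul_ediv_cancel_left h (by norm_num)]
    split_ifs with hcond <;> omega
  rw [hc, show (h + 1 - 1 : Int) = h by ring]
  refine List.map_congr_left fun k _ => ?_
  simp only [Function.comp]
  ring

-- A-side even-divisor count equals the all-divisor count of the half
theorem pvBridge (h k : Int) (hh : 0 ≤ h) :
    (PySem.List.pyRange 2 (2 * h + 1) 2).countP (fun i => decide (i ∣ 2 * k)) = pvD h k := by
  rw [pvEvenRange h hh, List.countP_map]
  unfold pvD
  refine List.countP_congr fun d _ => ?_
  simp only [Function.comp]
  simp only [decide_eq_true_eq]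
  exact mul_dvd_mul_iff_left (by norm_num : (2 : Int) ≠ 0)

-- characterisation of A's sieve: sieve2 (2h+1) at an even index 2k is the divisor count of k
theorem pvSieveA (h k : Int) (hh : 1 ≤ h) (hk1 : 1 ≤ k) (hk2 : k ≤ h) :
    pyget (sieve2 (2 * h + 1)) (2 * k) = (pvD h k : Int) := by
  have hfd : ∀ i : Int, 0 < i → PySem.Int.floordiv (2 * h + 1) i = (2 * h + 1) / i :=
    fun i hi => PySem.Int.floordiv_eq_ediv_of_pos hi
  have hinner : (fun (dc : Array Int) (i : Int) =>
      (PySem.List.pyRange 1 (PySem.Int.floordiv (2 * h + 1) i + 1) 1).foldl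
        (fun dc j => pyset dc (i * j) (pyget dc (i * j) + 1)) dc)
      = fun dc i =>
        ((PySem.List.pyRange 1 (PySem.Int.floordiv (2 * h + 1) i + 1) 1).map fun j => i * j).foldl
          pvStep dc := by
    funext dc i
    rw [List.foldl_map]
    rfl
  show pyget
      ((PySem.List.pyRange 2 (2 * h + 1) 2).foldl
        (fun dc i =>
          (PySem.List.pyRange 1 (PySem.Int.floordiv (2 * h + 1) i + 1) 1).foldl
            (fun dc j => pyset dc (i * j) (pyget dc (i * j) + 1)) dc)
        (Array.replicate (2 * h + 1 + 1).toNat 0))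
      (2 * k) = (pvD h k : Int)
  rw [hinner,
    pvFoldFlat pvStep (PySem.List.pyRange 2 (2 * h + 1) 2)
      (fun i => (PySem.List.pyRange 1 (PySem.Int.floordiv (2 * h + 1) i + 1) 1).map fun j => i * j)
      (Array.replicate (2 * h + 1 + 1).toNat 0)]
  have hbound : ∀ p ∈ (PySem.List.pyRange 2 (2 * h + 1) 2).flatMap
      (fun i => (PySem.List.pyRange 1 (PySem.Int.floordiv (2 * h + 1) i + 1) 1).map fun j => i * j),
      0 ≤ p ∧ p < ((Array.replicate (2 * h + 1 + 1).toNat (0 : Int)).size : Int) := by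
    intro p hp
    obtain ⟨i, hi, hp⟩ := List.mem_flatMap.mp hp
    rw [PySem.List.mem_pyRange_iff_of_pos (by norm_num)] at hi
    obtain ⟨j, hj, rfl⟩ := List.mem_map.mp hp
    rw [PySem.List.mem_pyRange_one, hfd i (by omega)] at hj
    have h1 : i * j ≤ i * ((2 * h + 1) / i) :=
      mul_le_mul_of_nonneg_left (by omega) (by omega)
    have h2 : i * ((2 * h + 1) / i) + (2 * h + 1) % i = 2 * h + 1 :=
      Int.mul_ediv_add_emod (2 * h + 1) i
    have h3 : 0 ≤ (2 * h + 1) % i := Int.emod_nonneg _ (by omega)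
    have h4 : 0 ≤ i * j := mul_nonneg (by omega) (by omega)
    rw [Array.size_replicate]
    constructor
    · exact h4
    · have : i * j ≤ 2 * h + 1 := by linarith
      have hcast : (((2 * h + 1 + 1).toNat : Nat) : Int) = 2 * h + 2 := by omega
      omega
  rw [pvIncCount _ _ (2 * k) (by omega) hbound, pvGetRep _ _]
  have hcnt : ((PySem.List.pyRange 2 (2 * h + 1) 2).flatMap
      (fun i => (PySem.List.pyRange 1 (PySem.Int.floordiv (2 * h + 1) i + 1) 1).map
        fun j => i * j)).count (2 * k) = pvD h k := by
    rw [pvCountFlat]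
    have hmc : ∀ i ∈ PySem.List.pyRange 2 (2 * h + 1) 2,
        ((PySem.List.pyRange 1 (PySem.Int.floordiv (2 * h + 1) i + 1) 1).map
          fun j => i * j).count (2 * k) = if i ∣ 2 * k then 1 else 0 := by
      intro i hi
      rw [PySem.List.mem_pyRange_iff_of_pos (by norm_num)] at hi
      rw [hfd i (by omega)]
      exact pvCountMulRange i (2 * k) (2 * h + 1) (by omega) (by omega) (by omega)
    rw [List.map_congr_left hmc, pvSumIte (fun i => i ∣ 2 * k), pvBridge h k (by omega)]
  rw [hcnt]
  omega

-- A's initial DP array (N = 2h)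
def pvDyn1 (h : Int) : Array Int :=
  pyset (pyset (Array.replicate (2 * h + 1).toNat (0 : Int)) 2 1) 0 1

-- A's DP step (N = 2h)
def pvAStep (h : Int) (a : Array Int) (n2 : Int) : Array Int :=
  pyset a n2
    (PySem.Int.mod
      (2 * pyget a (n2 - 2) + pyget (sieve2 (2 * h + 1)) n2
        - pyget (sieve2 (2 * h + 1)) (n2 - 2))
      998244353)

theorem pvDyn1Len (h : Int) : ((pvDyn1 h).size : Int) = ((2 * h + 1).toNat : Int) := by
  unfold pvDyn1
  rw [pvSizeSet, pvSizeSet, Array.size_replicate]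

theorem pvDyn1Two (h : Int) (hh : 1 ≤ h) : pyget (pvDyn1 h) 2 = 1 := by
  unfold pvDyn1
  rw [pvGetSetNe _ 0 2 _ (by omega) (by omega) (by omega),
    pvGetSet _ 2 2 _ (by omega) (by omega)
      (by rw [Array.size_replicate]; omega)]
  simp

-- invariant of A's DP loop: after the steps n2 = 4, 6, …, 2j+2 the array holds pvSpec h j at 2j+2
theorem pvInvA (h : Int) (hh : 1 ≤ h) :
    ∀ j : Nat, (j : Int) ≤ h - 1 →
      pyget
        (((List.range j).map fun t : Nat => (4 + 2 * (t : Int))).foldl (pvAStep h) (pvDyn1 h))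
        (2 + 2 * (j : Int)) = pvSpec h j := by
  intro j
  induction j with
  | zero => intro _; simpa using pvDyn1Two h hh
  | succ j ih =>
    intro hj
    have hj' : (j : Int) ≤ h - 1 := by push_cast at hj; omega
    rw [List.range_succ, List.map_append, List.foldl_append]
    simp only [List.map_cons, List.map_nil, List.foldl_cons, List.foldl_nil]
    set prev := ((List.range j).map fun t : Nat => (4 + 2 * (t : Int))).foldl (pvAStep h) (pvDyn1 h)
      with hprev
    have hlen : ((prev.size : Nat) : Int) = ((2 * h + 1).toNat : Int) := by
      rw [hprev, pvLen (pvAStep h)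
        (fun a p => by unfold pvAStep; rw [pvSizeSet]), pvDyn1Len]
    have hread : pyget prev (4 + 2 * (j : Int) - 2) = pvSpec h j := by
      rw [show (4 + 2 * (j : Int) - 2) = 2 + 2 * (j : Int) by ring]
      exact ih hj'
    have hs1 : pyget (sieve2 (2 * h + 1)) (4 + 2 * (j : Int))
        = ((pvD h ((j : Int) + 2)) : Int) := by
      rw [show (4 + 2 * (j : Int)) = 2 * ((j : Int) + 2) by ring]
      exact pvSieveA h ((j : Int) + 2) hh (by omega) (by omega)
    have hs2 : pyget (sieve2 (2 * h + 1)) (4 + 2 * (j : Int) - 2)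
        = ((pvD h ((j : Int) + 1)) : Int) := by
      rw [show (4 + 2 * (j : Int) - 2) = 2 * ((j : Int) + 1) by ring]
      exact pvSieveA h ((j : Int) + 1) hh (by omega) (by omega)
    unfold pvAStep
    rw [hread, hs1, hs2,
      pvGetSet prev (4 + 2 * (j : Int)) (2 + 2 * (((j + 1) : Nat) : Int)) _ (by omega)
        (by positivity) (by rw [hlen]; omega),
      if_pos (by push_cast; ring)]
    simp [pvSpec]

theorem pvSolveA (h : Int) (hh : 1 ≤ h) : solve (2 * h) = pvSpec h (h - 1).toNat := by
  have hr : PySem.List.pyRange 4 (2 * h + 1) 2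
      = (List.range (h - 1).toNat).map fun t : Nat => (4 + 2 * (t : Int)) := by
    rw [PySem.List.pyRange_of_pos 4 (2 * h + 1) (by norm_num)]
    have hc : (if (4 : Int) < 2 * h + 1 then ((2 * h + 1 - 4 + 2 - 1) / 2).toNat else 0)
        = (h - 1).toNat := by
      rw [show (2 * h + 1 - 4 + 2 - 1 : Int) = 2 * (h - 1) by ring,
        Int.mul_ediv_cancel_left (h - 1) (by norm_num)]
      split_ifs with hcond <;> omega
    rw [hc]
  rw [show solve (2 * h)
      = (if (2 * h : Int) = 1 then 1 else
          pyget ((PySem.List.pyRange 4 (2 * h + 1) 2).foldl (pvAStep h) (pvDyn1 h))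
            (2 * h)) from rfl,
    if_neg (by omega : ¬ (2 * h : Int) = 1), hr]
  have hmain := pvInvA h hh (h - 1).toNat (by omega)
  rw [show (2 + 2 * (((h - 1).toNat : Nat) : Int)) = 2 * h by omega] at hmain
  exact hmain

-- ---- B-side: the closed form ----

-- the recurrence of the exact unrolled value
theorem pvTrec (h : Int) (j : Nat) :
    pvT h (j + 1)
      = 2 * pvT h j + ((pvD h ((j : Int) + 2) : Int) - (pvD h ((j : Int) + 1) : Int)) := by
  unfold pvT
  rw [Finset.sum_range_succ]
  have hs : ∑ t ∈ Finset.range j,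
      2 ^ (j + 1 - 1 - t) * ((pvD h ((t : Int) + 2) : Int) - (pvD h ((t : Int) + 1) : Int))
      = 2 * ∑ t ∈ Finset.range j,
          2 ^ (j - 1 - t) * ((pvD h ((t : Int) + 2) : Int) - (pvD h ((t : Int) + 1) : Int)) := by
    rw [Finset.mul_sum]
    refine Finset.sum_congr rfl fun t ht => ?_
    have htj : t < j := Finset.mem_range.mp ht
    have he : j + 1 - 1 - t = (j - 1 - t) + 1 := by omega
    rw [he, pow_succ]
    ring
  rw [hs, show j + 1 - 1 - j = 0 by omega]
  rw [pow_succ]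
  ring

-- A's DP value is the exact value reduced mod p
theorem pvSpecT (h : Int) (j : Nat) : pvSpec h j = pvT h j % 998244353 := by
  induction j with
  | zero =>
    show (1 : Int) = pvT h 0 % 998244353
    unfold pvT
    norm_num
  | succ j ih =>
    show PySem.Int.mod
        (2 * pvSpec h j + (pvD h ((j : Int) + 2) : Int) - (pvD h ((j : Int) + 1) : Int)) 998244353
      = pvT h (j + 1) % 998244353
    rw [PySem.Int.mod_eq_emod_of_pos (by norm_num), ih, pvTrec]
    have hc : (2 * (pvT h j % 998244353) + (pvD h ((j : Int) + 2) : Int)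
          - (pvD h ((j : Int) + 1) : Int))
        ≡ (2 * pvT h j + (pvD h ((j : Int) + 2) : Int) - (pvD h ((j : Int) + 1) : Int))
          [ZMOD 998244353] := by
      have h1 : (pvT h j % 998244353) ≡ pvT h j [ZMOD 998244353] :=
        Int.emod_emod_of_dvd _ dvd_rfl
      exact ((h1.mul_left 2).add_right _).sub_right _
    have := hc
    unfold Int.ModEq at this
    rw [this]
    ring_nf

-- Abel summation for the telescoping weighted sum
theorem pvAbel (E : Nat → Int) :
    ∀ n : Nat,
      ∑ t ∈ Finset.range n, 2 ^ (n - 1 - t) * (E (t + 1) - E t)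
        = E n + (∑ t ∈ Finset.Ico 1 n, 2 ^ (n - 1 - t) * E t) - 2 ^ (n - 1) * E 0 := by
  intro n
  induction n with
  | zero => simp
  | succ n ih =>
    rcases Nat.eq_zero_or_pos n with h0 | hpos
    · subst h0
      simp
    · rw [Finset.sum_range_succ]
      have hL : ∑ t ∈ Finset.range n, 2 ^ (n + 1 - 1 - t) * (E (t + 1) - E t)
          = 2 * ∑ t ∈ Finset.range n, 2 ^ (n - 1 - t) * (E (t + 1) - E t) := by
        rw [Finset.mul_sum]
        refine Finset.sum_congr rfl fun t ht => ?_
        have := Finset.mem_range.mp ht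
        rw [show n + 1 - 1 - t = (n - 1 - t) + 1 by omega, pow_succ]
        ring
      have hR : ∑ t ∈ Finset.Ico 1 (n + 1), 2 ^ (n + 1 - 1 - t) * E t
          = (2 * ∑ t ∈ Finset.Ico 1 n, 2 ^ (n - 1 - t) * E t) + E n := by
        rw [Finset.sum_Ico_succ_top hpos]
        rw [Finset.mul_sum]
        rw [show n + 1 - 1 - n = 0 by omega]
        norm_num
        refine Finset.sum_congr rfl fun t ht => ?_
        have := Finset.mem_Ico.mp ht
        rw [show n - t = (n - 1 - t) + 1 by omega, pow_succ]
        ring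
      rw [hL, ih, hR, show n + 1 - 1 - n = 0 by omega,
        show n + 1 - 1 = (n - 1) + 1 by omega, pow_succ]
      ring

-- the divisor count of 1
theorem pvD1 (h : Int) (hh : 1 ≤ h) : pvD h 1 = 1 := by
  unfold pvD
  have hcp : (PySem.List.pyRange 1 (h + 1) 1).countP (fun i => decide (i ∣ (1 : Int)))
      = (PySem.List.pyRange 1 (h + 1) 1).count 1 := by
    rw [List.count_eq_countP]
    refine List.countP_congr fun i hi => ?_
    rw [PySem.List.mem_pyRange_one] at hi
    simp only [decide_eq_true_eq, beq_iff_eq]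
    constructor
    · intro hd
      have := Int.le_of_dvd (by norm_num) hd
      omega
    · rintro rfl; exact dvd_rfl
  rw [hcp]
  exact List.count_eq_one_of_mem (PySem.List.nodup_pyRange_one 1 (h + 1))
    (by rw [PySem.List.mem_pyRange_one]; omega)

-- closed form of the exact unrolled value (h ≥ 2)
theorem pvTclosed (h : Int) (hh : 2 ≤ h) :
    pvT h (h - 1).toNat
      = 2 ^ (h - 2).toNat + ∑ m ∈ Finset.Icc (2 : Int) h, (pvD h m : Int) * pvW h m := by
  set n := (h - 1).toNat with hn
  have hn1 : 1 ≤ n := by omega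
  unfold pvT
  have hterm : ∀ t ∈ Finset.range n,
      2 ^ (n - 1 - t) * ((pvD h ((t : Int) + 2) : Int) - (pvD h ((t : Int) + 1) : Int))
      = 2 ^ (n - 1 - t) * ((fun t : Nat => (pvD h ((t : Int) + 1) : Int)) (t + 1)
          - (fun t : Nat => (pvD h ((t : Int) + 1) : Int)) t) := by
    intro t _
    simp only
    rw [show ((t + 1 : Nat) : Int) + 1 = (t : Int) + 2 by push_cast; ring]
  rw [Finset.sum_congr rfl hterm, pvAbel (fun t : Nat => (pvD h ((t : Int) + 1) : Int)) n]
  rw [show (((0 : Nat) : Int) + 1) = (1 : Int) by norm_num, pvD1 h (by omega),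
    show ((n : Int) + 1) = h by omega]
  have hsplit : Finset.Icc (2 : Int) h = insert h (Finset.Icc (2 : Int) (h - 1)) := by
    ext x
    simp only [Finset.mem_Icc, Finset.mem_insert]
    omega
  rw [hsplit, Finset.sum_insert (by simp only [Finset.mem_Icc]; omega)]
  have hWh : pvW h h = 1 := by unfold pvW; rw [if_pos rfl]
  have hbij : ∑ m ∈ Finset.Icc (2 : Int) (h - 1), (pvD h m : Int) * pvW h m
      = ∑ t ∈ Finset.Ico 1 n, 2 ^ (n - 1 - t) * (pvD h ((t : Int) + 1) : Int) := by
    refine Finset.sum_nbij' (fun m : Int => (m - 1).toNat) (fun t : Nat => (t : Int) + 1)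
      ?_ ?_ ?_ ?_ ?_
    · intro m hm
      rw [Finset.mem_Icc] at hm
      rw [Finset.mem_Ico]
      dsimp only
      omega
    · intro t ht
      rw [Finset.mem_Ico] at ht
      rw [Finset.mem_Icc]
      dsimp only
      omega
    · intro m hm
      rw [Finset.mem_Icc] at hm
      dsimp only
      omega
    · intro t ht
      rw [Finset.mem_Ico] at ht
      dsimp only
      omega
    · intro m hm
      rw [Finset.mem_Icc] at hm
      dsimp only
      have hmh : m ≠ h := by omega
      have harg : ((((m - 1).toNat : Nat) : Int) + 1) = m := by omega
      have hexp : n - 1 - (m - 1).toNat = (h - 1 - m).toNat := by omega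
      rw [harg, hexp]
      unfold pvW
      rw [if_neg hmh]
      ring
  rw [hbij, hWh]
  have hpow : (2 : Int) ^ n = 2 ^ (h - 2).toNat * 2 := by
    rw [show n = (h - 2).toNat + 1 by omega, pow_succ]
  have hpow2 : (2 : Int) ^ (n - 1) = 2 ^ (h - 2).toNat := by
    rw [show n - 1 = (h - 2).toNat by omega]
  rw [hpow, hpow2]
  ring

-- every visited position is in [2, h]
theorem pvLmem (h m : Int) (hm : m ∈ pvL h) : 2 ≤ m ∧ m ≤ h := by
  obtain ⟨i, hi, hp⟩ := List.mem_flatMap.mp hm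
  rw [PySem.List.mem_pyRange_one] at hi
  rw [PySem.List.mem_pyRange_iff_of_pos (by omega)] at hp
  omega

-- count of k among B's sieve visits is the divisor count of k
theorem pvLcount (h k : Int) (hk2 : 2 ≤ k) (hkh : k ≤ h) :
    (pvL h).count k = pvD h k := by
  unfold pvL
  rw [pvCountFlat]
  have hmc : ∀ i ∈ PySem.List.pyRange 1 (h + 1) 1,
      (PySem.List.pyRange (max i 2) (h + 1) i).count k = if i ∣ k then 1 else 0 := by
    intro i hi
    rw [PySem.List.mem_pyRange_one] at hi
    rcases eq_or_lt_of_le hi.1 with h1 | h2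
    · -- i = 1
      rw [show (max i 2) = 2 by omega]
      rw [← h1]
      have : (PySem.List.pyRange 2 (h + 1) 1).count k = 1 :=
        List.count_eq_one_of_mem (PySem.List.nodup_pyRange_one 2 (h + 1))
          (by rw [PySem.List.mem_pyRange_one]; omega)
      rw [this, if_pos (one_dvd k)]
    · -- 2 ≤ i
      rw [show (max i 2) = i by omega]
      exact pvCountStepRange i k h (by omega) (by omega) hkh
  rw [List.map_congr_left hmc, pvSumIte (fun i => i ∣ k)]
  rfl

-- a fold of mod-reduced additions over a nonempty list is the reduced total
theorem pvFoldMod (p : Int) (hp : 0 < p) :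
    ∀ (xs : List Int), xs ≠ [] → ∀ (s0 : Int),
      xs.foldl (fun s x => PySem.Int.mod (s + x) p) s0 = (s0 + xs.sum) % p := by
  intro xs
  induction xs with
  | nil => intro hne; exact absurd rfl hne
  | cons x xs ih =>
    intro _ s0
    rw [List.foldl_cons]
    rcases eq_or_ne xs [] with rfl | hne
    · simp [PySem.Int.mod_eq_emod_of_pos hp]
    · rw [ih hne, PySem.Int.mod_eq_emod_of_pos hp, List.sum_cons]
      have hc : ((s0 + x) % p + xs.sum) ≡ (s0 + (x + xs.sum)) [ZMOD p] := by
        have h1 : (s0 + x) % p ≡ s0 + x [ZMOD p] := Int.emod_emod_of_dvd _ dvd_rfl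
        have := h1.add_right xs.sum
        calc ((s0 + x) % p + xs.sum) ≡ (s0 + x + xs.sum) [ZMOD p] := this
          _ = s0 + (x + xs.sum) := by ring
      exact hc

-- grouping the weighted visit sum by position
theorem pvLsum (h : Int) (f : Int → Int) :
    ((pvL h).map f).sum = ∑ m ∈ Finset.Icc (2 : Int) h, ((pvL h).count m : Int) * f m := by
  rw [Finset.sum_list_map_count]
  refine Finset.sum_subset ?_ ?_
  · intro m hm
    rw [List.mem_toFinset] at hm
    have := pvLmem h m hm
    rw [Finset.mem_Icc]
    omega
  · intro m _ hm
    rw [List.mem_toFinset] at hm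
    rw [List.count_eq_zero_of_not_mem hm]
    simp

-- B's power table pw[t] = 2^t mod p
def pvPw (h : Int) : Array Int :=
  (PySem.List.pyRange 1 (h - 1) 1).foldl
    (fun pw t => pyset pw t (PySem.Int.mod (pyget pw (t - 1) * 2) 998244353))
    (Array.replicate (h - 1).toNat 1)

-- prefix invariant of the power-table loop
theorem pvPwInv (h : Int) (hh : 2 ≤ h) :
    ∀ k : Nat, (k : Int) ≤ h - 2 →
      ∀ t : Int, 0 ≤ t → t ≤ h - 2 →
        pyget (((List.range k).map fun u : Nat => (1 + u : Int)).foldl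
          (fun pw t => pyset pw t (PySem.Int.mod (pyget pw (t - 1) * 2) 998244353))
          (Array.replicate (h - 1).toNat 1)) t
        = if t ≤ (k : Int) then 2 ^ t.toNat % 998244353 else 1 := by
  intro k
  induction k with
  | zero =>
    intro _ t h0 ht
    have hget : pyget (Array.replicate (h - 1).toNat (1 : Int)) t = 1 := by
      unfold pyget
      rw [dif_pos ⟨h0, by rw [Array.size_replicate]; omega⟩]
      simp
    simp only [List.range_zero, List.map_nil, List.foldl_nil, hget]
    split_ifs with hle
    · rw [show t.toNat = 0 by omega]
      norm_num
    · rfl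
  | succ k ih =>
    intro hk t h0 ht
    have hk' : (k : Int) ≤ h - 2 := by push_cast at hk; omega
    rw [List.range_succ, List.map_append, List.foldl_append]
    simp only [List.map_cons, List.map_nil, List.foldl_cons, List.foldl_nil]
    set Q := ((List.range k).map fun u : Nat => (1 + u : Int)).foldl
      (fun pw t => pyset pw t (PySem.Int.mod (pyget pw (t - 1) * 2) 998244353))
      (Array.replicate (h - 1).toNat 1) with hQ
    have hQlen : ((Q.size : Nat) : Int) = ((h - 1).toNat : Int) := by
      rw [hQ, pvLen _ (fun a p => by rw [pvSizeSet]), Array.size_replicate]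
    have hkread : pyget Q (1 + (k : Int) - 1) = 2 ^ k % 998244353 := by
      rw [show (1 + (k : Int) - 1) = (k : Int) by ring, ih hk' (k : Int) (by omega) (by omega),
        if_pos le_rfl, Int.toNat_natCast]
    have hnew : PySem.Int.mod (pyget Q (1 + (k : Int) - 1) * 2) 998244353
        = 2 ^ (k + 1) % 998244353 := by
      rw [hkread, PySem.Int.mod_eq_emod_of_pos (by norm_num), Int.mul_emod,
        Int.emod_emod_of_dvd _ dvd_rfl, ← Int.mul_emod, pow_succ]
    rw [hnew, pvGetSet Q (1 + (k : Int)) t _ (by omega) h0 (by omega)]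
    by_cases hteq : t = 1 + (k : Int)
    · rw [if_pos hteq, if_pos (by push_cast; omega), show t.toNat = k + 1 by omega]
    · rw [if_neg hteq, ih hk' t h0 ht]
      by_cases htk : t ≤ (k : Int)
      · rw [if_pos htk, if_pos (by push_cast; omega)]
      · rw [if_neg htk, if_neg (by push_cast; omega)]

-- reading the power table
theorem pvPwGet (h t : Int) (hh : 2 ≤ h) (h0 : 0 ≤ t) (ht : t ≤ h - 2) :
    pyget (pvPw h) t = 2 ^ t.toNat % 998244353 := by
  unfold pvPw
  rw [PySem.List.pyRange_one 1 (h - 1), show (h - 1 - 1 : Int) = h - 2 by ring]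
  rw [pvPwInv h hh (h - 2).toNat (by omega) t h0 ht, if_pos (by omega)]

-- B's port computes the reduced closed form (h ≥ 2)
theorem pvSolveB (h : Int) (hh : 2 ≤ h) :
    solve_alt (2 * h)
      = (2 ^ (h - 2).toNat + ∑ m ∈ Finset.Icc (2 : Int) h, (pvD h m : Int) * pvW h m)
        % 998244353 := by
  have hmod : PySem.Int.mod (2 * h) 2 = 0 := by
    rw [PySem.Int.mod_eq_emod_of_pos (by norm_num)]
    exact Int.mul_emod_right 2 h
  have hdiv : PySem.Int.floordiv (2 * h) 2 = h := by
    rw [PySem.Int.floordiv_eq_ediv_of_pos (by norm_num)]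
    exact Int.mul_ediv_cancel_left h (by norm_num)
  show (if (2 * h : Int) = 1 then 1 else
      if PySem.Int.mod (2 * h) 2 = 1 then 0 else
        if PySem.Int.floordiv (2 * h) 2 = 1 then 1 else
        (PySem.List.pyRange 1 (PySem.Int.floordiv (2 * h) 2 + 1) 1).foldl
          (fun s i =>
            (PySem.List.pyRange (max i 2) (PySem.Int.floordiv (2 * h) 2 + 1) i).foldl
              (fun s m =>
                PySem.Int.mod
                  (s + (if m = PySem.Int.floordiv (2 * h) 2 then 1
                    else pyget (pvPw (PySem.Int.floordiv (2 * h) 2))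
                      (PySem.Int.floordiv (2 * h) 2 - 1 - m)))
                  998244353)
              s)
          (pyget (pvPw (PySem.Int.floordiv (2 * h) 2)) (PySem.Int.floordiv (2 * h) 2 - 2))) = _
  rw [if_neg (by omega : ¬ (2 * h : Int) = 1), hmod,
    if_neg (by norm_num : ¬ (0 : Int) = 1), hdiv,
    if_neg (by omega : ¬ h = 1)]
  rw [pvFoldFlat (σ := Int)
    (fun s m =>
      PySem.Int.mod (s + (if m = h then 1 else pyget (pvPw h) (h - 1 - m))) 998244353)
    (PySem.List.pyRange 1 (h + 1) 1) (fun i => PySem.List.pyRange (max i 2) (h + 1) i)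
    (pyget (pvPw h) (h - 2))]
  have hflat : ((PySem.List.pyRange 1 (h + 1) 1).flatMap
      fun i => PySem.List.pyRange (max i 2) (h + 1) i) = pvL h := rfl
  rw [hflat]
  -- fold with the weight applied is the fold over the mapped list
  rw [show (pvL h).foldl
      (fun s m =>
        PySem.Int.mod (s + (if m = h then 1 else pyget (pvPw h) (h - 1 - m))) 998244353)
      (pyget (pvPw h) (h - 2))
      = ((pvL h).map
          (fun m => if m = h then 1 else pyget (pvPw h) (h - 1 - m))).foldl
          (fun s x => PySem.Int.mod (s + x) 998244353)
          (pyget (pvPw h) (h - 2))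
    from (List.foldl_map
      (f := fun m => if m = h then (1 : Int) else pyget (pvPw h) (h - 1 - m))
      (g := fun s x => PySem.Int.mod (s + x) 998244353) (l := pvL h)
      (init := pyget (pvPw h) (h - 2))).symm]
  have hne : ((pvL h).map
      (fun m => if m = h then (1 : Int) else pyget (pvPw h) (h - 1 - m))) ≠ [] := by
    have h2mem : (2 : Int) ∈ pvL h := by
      refine List.mem_flatMap.mpr ⟨1, ?_, ?_⟩
      · rw [PySem.List.mem_pyRange_one]; omega
      · rw [show (max (1 : Int) 2) = 2 by norm_num, PySem.List.mem_pyRange_one]; omega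
    intro hcon
    rw [List.map_eq_nil_iff] at hcon
    rw [hcon] at h2mem
    exact List.not_mem_nil h2mem
  rw [pvFoldMod 998244353 (by norm_num) _ hne]
  rw [pvLsum h]
  have hcnt : ∀ m ∈ Finset.Icc (2 : Int) h,
      (((pvL h).count m : Nat) : Int)
          * (if m = h then (1 : Int) else pyget (pvPw h) (h - 1 - m))
        = (pvD h m : Int)
          * (if m = h then (1 : Int) else pyget (pvPw h) (h - 1 - m)) := by
    intro m hm
    rw [Finset.mem_Icc] at hm
    rw [pvLcount h m hm.1 hm.2]
  rw [Finset.sum_congr rfl hcnt]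
  have hpt : ∀ m ∈ Finset.Icc (2 : Int) h,
      ((pvD h m : Int)
          * (if m = h then (1 : Int) else pyget (pvPw h) (h - 1 - m)))
          % 998244353
        = ((pvD h m : Int) * pvW h m) % 998244353 := by
    intro m hm
    rw [Finset.mem_Icc] at hm
    by_cases hmh : m = h
    · subst hmh
      rw [if_pos rfl]
      unfold pvW
      rw [if_pos rfl]
    · rw [if_neg hmh, pvPwGet h (h - 1 - m) hh (by omega) (by omega)]
      unfold pvW
      rw [if_neg hmh]
      rw [Int.mul_emod, Int.emod_emod_of_dvd _ dvd_rfl, ← Int.mul_emod]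
  have hsum : (∑ m ∈ Finset.Icc (2 : Int) h,
        (pvD h m : Int)
          * (if m = h then (1 : Int) else pyget (pvPw h) (h - 1 - m)))
        % 998244353
      = (∑ m ∈ Finset.Icc (2 : Int) h, (pvD h m : Int) * pvW h m) % 998244353 := by
    rw [Finset.sum_int_mod, Finset.sum_congr rfl hpt, ← Finset.sum_int_mod]
  rw [pvPwGet h (h - 2) hh (by omega) (by omega)]
  have h1 : ((2 : Int) ^ (h - 2).toNat % 998244353)
      ≡ 2 ^ (h - 2).toNat [ZMOD 998244353] :=
    Int.emod_emod_of_dvd _ dvd_rfl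
  exact h1.add hsum

-- ===== VERDICT (by name: the statement is the Claim_ definition above) =====
theorem solve_spec : Claim_equal_solve := by
  intro N _ hpre
  unfold Spec_solve
  unfold Pre_solve at hpre
  by_cases h1 : N = 1
  · subst h1; rfl
  by_cases hodd : N % 2 = 1
  · have hB : solve_alt N = 0 := by
      show (if N = 1 then (1 : Int) else
          if PySem.Int.mod N 2 = 1 then 0 else
            if PySem.Int.floordiv N 2 = 1 then 1 else
            (PySem.List.pyRange 1 (PySem.Int.floordiv N 2 + 1) 1).foldl
              (fun s i =>
                (PySem.List.pyRange (max i 2) (PySem.Int.floordiv N 2 + 1) i).foldl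
                  (fun s m =>
                    PySem.Int.mod
                      (s + (if m = PySem.Int.floordiv N 2 then 1
                        else pyget (pvPw (PySem.Int.floordiv N 2))
                          (PySem.Int.floordiv N 2 - 1 - m)))
                      998244353)
                  s)
              (pyget (pvPw (PySem.Int.floordiv N 2)) (PySem.Int.floordiv N 2 - 2))) = 0
      rw [if_neg h1, if_pos (by rw [PySem.Int.mod_eq_emod_of_pos (by norm_num)]; exact hodd)]
    have hA : solve N = 0 := by
      show (if N = 1 then (1 : Int) else
          pyget
            ((PySem.List.pyRange 4 (N + 1) 2).foldl
              (fun a n2 => pyset a n2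
                ((fun (a : Array Int) (n2 : Int) => PySem.Int.mod
                  (2 * pyget a (n2 - 2) + pyget (sieve2 (N + 1)) n2
                    - pyget (sieve2 (N + 1)) (n2 - 2)) 998244353) a n2))
              (pyset (pyset (Array.replicate (N + 1).toNat 0) 2 1) 0 1))
            N) = 0
      rw [if_neg h1]
      rw [pvUntouched
        (fun (a : Array Int) (n2 : Int) => PySem.Int.mod
          (2 * pyget a (n2 - 2) + pyget (sieve2 (N + 1)) n2
            - pyget (sieve2 (N + 1)) (n2 - 2)) 998244353)
        (PySem.List.pyRange 4 (N + 1) 2) _ N (by omega)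
        (fun p hp => by
          rw [PySem.List.mem_pyRange_iff_of_pos (by norm_num)] at hp
          exact ⟨by omega, by omega⟩)]
      rw [pvGetSetNe _ 0 N _ (by omega) (by omega) (by omega),
        pvGetSetNe _ 2 N _ (by omega) (by omega) (by omega),
        pvGetRep _ N]
    rw [hA, hB]
  · obtain ⟨m, rfl⟩ : ∃ m : Int, N = 2 * m := ⟨N / 2, by omega⟩
    have hm : 1 ≤ m := by omega
    rcases eq_or_lt_of_le hm with hm1 | hm2
    · -- m = 1 : both sides are 1
      rw [← hm1]
      rw [pvSolveA 1 (by norm_num)]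
      show pvSpec 1 0 = solve_alt 2
      have : solve_alt 2 = 1 := by decide
      rw [this]
      rfl
    · have hm2' : 2 ≤ m := by omega
      rw [pvSolveA m hm, pvSpecT, pvTclosed m hm2', pvSolveB m hm2']
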